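-- pv_equiv track=rewrite | github.com/fciocan42/FLCD | Labs/Lab3/Scanner.py | join_string_constants
-- ===== SOURCE A (Python) =====
-- def join_string_constants(quote_indexes, tokens):
--     while len(quote_indexes) >= 2:
--         first_pos = quote_indexes[0]
--         second_pos = quote_indexes[1]
--
--         tokens = tokens[:first_pos] + [''.join(tokens[first_pos: second_pos + 1])] + tokens[second_pos + 1:]
--
--         quote_indexes.pop(0)
--         quote_indexes.pop(0)
--         for i in range(len(quote_indexes)):
--             quote_indexes[i] -= len(tokens[first_pos: second_pos]) - 1
--
--     return tokens
-- ===== SOURCE B (Python) =====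
-- # B: one pass over the precomputed (first, second) pairs with a cumulative index
-- # offset, instead of A's repeated popping and O(k) rescaling of quote_indexes.
-- # Note: A empties quote_indexes in place; B does not mutate it (return value equal).
-- def join_string_constants(quote_indexes, tokens):
--     pairs = list(zip(quote_indexes[0::2], quote_indexes[1::2]))
--     acc = 0
--     for f0, s0 in pairs:
--         f = f0 - acc
--         s = s0 - acc
--         tokens = tokens[:f] + [''.join(tokens[f:s + 1])] + tokens[s + 1:]
--         acc += len(tokens[f:s]) - 1
--     return tokens
-- ===== Notes on version B (the rewrite author's own statement) =====
-- stated objective: faster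
-- what changed: B precomputes the (first,second) pairs once and carries a single cumulative index offset through one pass, eliminating A's per-iteration pop(0) calls and O(k) rescaling loop over the remaining quote indexes (A also empties quote_indexes in place; B leaves it untouched).
import Mathlib
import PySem

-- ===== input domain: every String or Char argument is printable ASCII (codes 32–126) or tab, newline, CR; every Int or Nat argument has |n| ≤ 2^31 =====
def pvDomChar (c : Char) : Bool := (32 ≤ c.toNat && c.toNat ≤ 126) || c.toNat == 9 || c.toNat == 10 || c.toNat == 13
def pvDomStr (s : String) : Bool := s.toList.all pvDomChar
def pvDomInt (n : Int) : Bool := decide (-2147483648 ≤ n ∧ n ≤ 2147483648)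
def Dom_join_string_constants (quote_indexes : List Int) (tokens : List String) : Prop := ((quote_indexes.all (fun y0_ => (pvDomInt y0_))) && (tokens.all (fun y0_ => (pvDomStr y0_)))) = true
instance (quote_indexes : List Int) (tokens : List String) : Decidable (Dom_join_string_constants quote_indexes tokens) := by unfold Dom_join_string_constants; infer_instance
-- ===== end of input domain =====

-- B replaces A's repeated popping and O(k) rescaling of quote_indexes by one pass over
-- the precomputed pairs with a cumulative offset (return value equal; A additionally
-- empties quote_indexes in place, B does not mutate it).

-- ===== PORT A =====
def join_string_constants (quote_indexes : List Int) (tokens : List String) : List String :=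
  match quote_indexes with
  | first_pos :: second_pos :: rest =>
      -- tokens = tokens[:first_pos] + [''.join(tokens[first_pos:second_pos+1])] + tokens[second_pos+1:]
      let tokens' := PySem.List.slice tokens none (some first_pos)
        ++ [PySem.Str.join "" (PySem.List.slice tokens (some first_pos) (some (second_pos + 1)))]
        ++ PySem.List.slice tokens (some (second_pos + 1)) none
      -- each remaining index is decreased by len(tokens[first_pos:second_pos]) - 1 (on the NEW tokens)
      let delta : Int := ((PySem.List.slice tokens' (some first_pos) (some second_pos)).length : Int) - 1
      join_string_constants (rest.map (fun i => i - delta)) tokens'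
  | _ => tokens
termination_by quote_indexes.length
decreasing_by simp

-- ===== PORT B =====
-- list(zip(quote_indexes[0::2], quote_indexes[1::2])): the even/odd-position pairs
def pairsB : List Int → List (Int × Int)
  | [] => []
  | [_] => []
  | a :: b :: r => (a, b) :: pairsB r

def stepB (st : List String × Int) (p : Int × Int) : List String × Int :=
  let f := p.1 - st.2
  let s := p.2 - st.2
  let toks := PySem.List.slice st.1 none (some f)
    ++ [PySem.Str.join "" (PySem.List.slice st.1 (some f) (some (s + 1)))]
    ++ PySem.List.slice st.1 (some (s + 1)) none
  (toks, st.2 + (((PySem.List.slice toks (some f) (some s)).length : Int) - 1))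

def join_string_constants_alt (quote_indexes : List Int) (tokens : List String) : List String :=
  ((pairsB quote_indexes).foldl stepB (tokens, 0)).1

-- ===== PRECONDITION & SPEC =====
def Spec_join_string_constants (quote_indexes : List Int) (tokens : List String) (out : List String) : Prop := out = join_string_constants_alt quote_indexes tokens
instance (quote_indexes : List Int) (tokens : List String) (out : List String) : Decidable (Spec_join_string_constants quote_indexes tokens out) := by unfold Spec_join_string_constants; infer_instance

-- ===== CLAIM (what is proved, stated in full; the proofs are below) =====
def Claim_equal_join_string_constants : Prop := ∀ (quote_indexes : List Int) (tokens : List String), Dom_join_string_constants quote_indexes tokens → Spec_join_string_constants quote_indexes tokens (join_string_constants quote_indexes tokens)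

-- ===== LEMMAS AND PROOFS =====

-- invariant: B's fold with accumulated offset a equals A's loop on the rescaled indexes
theorem foldB_eq_joinA (qi : List Int) : ∀ (tokens : List String) (a : Int),
    ((pairsB qi).foldl stepB (tokens, a)).1
      = join_string_constants (qi.map (fun i => i - a)) tokens := by
  induction qi using pairsB.induct with
  | case3 f s r ih =>
      intro tokens a
      simp only [pairsB, List.foldl_cons, List.map_cons]
      rw [ih]
      conv_rhs => rw [join_string_constants.eq_def]
      simp only [stepB, List.map_map]
      congr 1
      apply List.map_congr_left
      intro x _
      simp only [Function.comp_apply]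
      ring
  | case1 =>
      intro tokens a
      rw [join_string_constants.eq_def]; simp [pairsB]
  | case2 x =>
      intro tokens a
      rw [join_string_constants.eq_def]; simp [pairsB]

-- ===== VERDICT (by name: the statement is the Claim_ definition above) =====
theorem join_string_constants_spec : Claim_equal_join_string_constants := by
  intro qi tokens _
  unfold Spec_join_string_constants join_string_constants_alt
  rw [foldB_eq_joinA]
  simp
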